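-- pv_equiv track=rewrite | github.com/illeontev/hyperskill_generating_randomness | predictor.py | get_triada_dict
-- ===== SOURCE A (Python) =====
-- def convert_number_to_triade(number):
--     res = ""
--     while number > 0:
--         dig = number % 2
--         res = str(dig) + res
--         number = number // 2
--
--     while len(res) < 3:
--         res = '0' + res
--     return res
--
-- def get_triada_dict(result):
--     triada_dict = {}
--
--     for i in range(8):
--         triada = convert_number_to_triade(i)
--         triada_dict[triada] = [0, 0]
--
--     for i in range(0, len(result) - 3):
--         cur_triada = result[i:i + 3]
--         if result[i + 3] == "0":
--             triada_dict[cur_triada][0] += 1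
--         else:
--             triada_dict[cur_triada][1] += 1
--
--     return triada_dict
-- ===== SOURCE B (Python) =====
-- def get_triada_dict(result):
--     windows = [result[i:i + 4] for i in range(len(result) - 3)]
--     triads = [format(i, '03b') for i in range(8)]
--     return {t: [sum(1 for w in windows if w[:3] == t and w[3] == '0'),
--                 sum(1 for w in windows if w[:3] == t and w[3] != '0')]
--             for t in triads}
-- ===== Notes on version B (the rewrite author's own statement) =====
-- stated objective: alternative
-- what changed: A makes one scan over the bitstring, branching on the next bit and mutating a triad-keyed dict of [zero,one] counters in place; B first materialises the list of all length-4 windows once and then computes each of the eight triad entries by independent counting passes over that list, never mutating a dict.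
import Mathlib
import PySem

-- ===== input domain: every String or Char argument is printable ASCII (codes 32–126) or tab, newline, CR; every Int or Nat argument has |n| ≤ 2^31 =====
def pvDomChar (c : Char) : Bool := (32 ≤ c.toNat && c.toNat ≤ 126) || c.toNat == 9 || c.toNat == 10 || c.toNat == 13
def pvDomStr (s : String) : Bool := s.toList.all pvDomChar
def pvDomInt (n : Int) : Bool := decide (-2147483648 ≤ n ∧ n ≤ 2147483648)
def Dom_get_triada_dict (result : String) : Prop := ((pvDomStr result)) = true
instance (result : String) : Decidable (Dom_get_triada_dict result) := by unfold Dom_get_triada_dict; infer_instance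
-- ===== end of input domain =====

-- B replaces A's single scan that mutates a triad-keyed dict of counters with a window list built
-- once and eight independent per-triad counting passes (objective: alternative decomposition).

-- ===== PORT A =====
-- while number > 0: … ; fuel = number.toNat + 1 bounds the halving steps (totality guard only, never exhausted)
def ctt_loop : Nat → Int → List Char → List Char
  | 0, _, res => res
  | fuel + 1, number, res =>
    if number > 0 then
      ctt_loop fuel (PySem.Int.floordiv number 2)
        (PySem.Int.toChars (PySem.Int.mod number 2) ++ res)
    else res

-- while len(res) < 3: res = '0' + res ; fuel 3 bounds the padding steps (totality guard only, never exhausted)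
def ctt_pad : Nat → List Char → List Char
  | 0, res => res
  | fuel + 1, res => if res.length < 3 then ctt_pad fuel ('0' :: res) else res

def convert_number_to_triade (number : Int) : String :=
  String.ofList (ctt_pad 3 (ctt_loop (number.toNat + 1) number []))

-- for i in range(8): triada_dict[convert_number_to_triade(i)] = [0, 0]
def A_init : PySem.Dict String (List Int) :=
  (PySem.List.pyRange 0 8 1).foldl
    (fun d i => d.insert (convert_number_to_triade i) [0, 0]) PySem.Dict.empty

-- one iteration of A's counting loop: triada_dict[cur_triada][0 or 1] += 1
def A_step (result : String) (d : PySem.Dict String (List Int)) (i : Int) :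
    PySem.Dict String (List Int) :=
  let cur_triada := PySem.Str.slice result (some i) (some (i + 3))
  if PySem.Str.pyGet? result (i + 3) = some '0' then
    d.modify cur_triada [] (fun l => PySem.List.pySetD l 0 (PySem.List.pyGetD l 0 0 + 1))
  else
    d.modify cur_triada [] (fun l => PySem.List.pySetD l 1 (PySem.List.pyGetD l 1 0 + 1))

def get_triada_dict (result : String) : List (String × List Int) :=
  ((PySem.List.pyRange 0 (PySem.Str.len result - 3) 1).foldl (A_step result) A_init).items

-- ===== PORT B =====
-- format(i, '03b')
def B_fmt (i : Int) : String := PySem.Str.zfill (PySem.Int.toBin i) 3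

def get_triada_dict_alt (result : String) : List (String × List Int) :=
  let windows := (PySem.List.pyRange 0 (PySem.Str.len result - 3) 1).map
    (fun i => PySem.Str.slice result (some i) (some (i + 4)))
  let triads := (PySem.List.pyRange 0 8 1).map B_fmt
  triads.map (fun t =>
    (t, [windows.foldl (fun acc w =>
            if PySem.Str.slice w (some 0) (some 3) = t ∧ PySem.Str.pyGet? w 3 = some '0'
            then acc + 1 else acc) (0 : Int),
         windows.foldl (fun acc w =>
            if PySem.Str.slice w (some 0) (some 3) = t ∧ ¬ PySem.Str.pyGet? w 3 = some '0'
            then acc + 1 else acc) (0 : Int)]))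

-- ===== PRECONDITION & SPEC =====
-- Pre_ admits exactly the inputs on which A returns: when len(result) ≥ 4 every char before the
-- last must be a binary digit — a non-binary char there makes A's triad lookup raise KeyError.
def Pre_get_triada_dict (result : String) : Prop :=
  PySem.Str.len result ≤ 3
    ∨ (result.toList.dropLast.all (fun c => c == '0' || c == '1')) = true
instance (result : String) : Decidable (Pre_get_triada_dict result) := by
  unfold Pre_get_triada_dict; infer_instance

def pvWitness_get_triada_dict : String := "01011"

def Spec_get_triada_dict (result : String) (out : List (String × List Int)) : Prop :=
  out = get_triada_dict_alt result
instance (result : String) (out : List (String × List Int)) :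
    Decidable (Spec_get_triada_dict result out) := by unfold Spec_get_triada_dict; infer_instance

-- ===== CLAIM (what is proved, stated in full; the proofs are below) =====
def Claim_equal_get_triada_dict : Prop := ∀ (result : String), Dom_get_triada_dict result →
  Pre_get_triada_dict result → Spec_get_triada_dict result (get_triada_dict result)

-- ===== LEMMAS AND PROOFS =====

def triads8 : List String := ["000", "001", "010", "011", "100", "101", "110", "111"]

-- the triad A slices at window start i, and the two per-window count predicates
def triA (result : String) (i : Nat) : String :=
  PySem.Str.slice result (some (i : Int)) (some ((i : Int) + 3))

def bA0 (result t : String) (i : Nat) : Bool :=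
  decide (triA result i = t ∧ PySem.Str.pyGet? result ((i : Int) + 3) = some '0')
def bA1 (result t : String) (i : Nat) : Bool :=
  decide (triA result i = t ∧ ¬ PySem.Str.pyGet? result ((i : Int) + 3) = some '0')

def c0 (result : String) (n : Nat) (t : String) : Int :=
  ((List.range n).countP (fun i => bA0 result t i) : Int)
def c1 (result : String) (n : Nat) (t : String) : Int :=
  ((List.range n).countP (fun i => bA1 result t i) : Int)

set_option maxRecDepth 10000 in
lemma A_init_eq : A_init = PySem.Dict.mk (triads8.map (fun t => (t, ([0, 0] : List Int)))) := by
  decide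

set_option maxRecDepth 10000 in
lemma triadsB_eq : (PySem.List.pyRange 0 8 1).map B_fmt = triads8 := by decide

lemma pyRange_toNat (m : Int) :
    PySem.List.pyRange 0 m 1 = PySem.List.pyRange 0 (m.toNat : Int) 1 := by
  by_cases h : m ≤ 0
  · rw [PySem.List.pyRange_one_eq_nil h, PySem.List.pyRange_one_eq_nil (by omega)]
  · rw [Int.toNat_of_nonneg (by omega)]

lemma mem_triads8 (t : String) (hlen : t.toList.length = 3)
    (hbin : ∀ c ∈ t.toList, c = '0' ∨ c = '1') : t ∈ triads8 := by
  obtain ⟨a, b, c, h⟩ := List.length_eq_three.mp hlen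
  have ht : t = String.ofList [a, b, c] := by rw [← h, String.ofList_toList]
  rw [h] at hbin
  have ha := hbin a (by simp); have hb := hbin b (by simp); have hc := hbin c (by simp)
  rcases ha with ha | ha <;> rcases hb with hb | hb <;> rcases hc with hc | hc <;>
    subst ha hb hc <;> rw [ht] <;> decide

lemma modify_mk_map (ts : List String) (hnd : ts.Nodup) (v : String → List Int)
    (k : String) (hk : k ∈ ts) (f : List Int → List Int) :
    (PySem.Dict.mk (ts.map (fun t => (t, v t)))).modify k [] f
      = PySem.Dict.mk (ts.map (fun t => (t, if t = k then f (v t) else v t))) := by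
  have hkeys : (PySem.Dict.mk (ts.map (fun t => (t, v t)))).keys = ts := by
    simp [PySem.Dict.keys_mk, Function.comp_def]
  have hndk : (PySem.Dict.mk (ts.map (fun t => (t, v t)))).keys.Nodup := by rw [hkeys]; exact hnd
  have hc : (PySem.Dict.mk (ts.map (fun t => (t, v t)))).contains k = true := by
    rw [PySem.Dict.contains_iff_mem_keys, hkeys]; exact hk
  have hg : (PySem.Dict.mk (ts.map (fun t => (t, v t)))).getD k [] = v k :=
    PySem.Dict.getD_of_mem_items _ (List.mem_map_of_mem (f := fun t => (t, v t)) hk) hndk []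
  show (PySem.Dict.mk (ts.map (fun t => (t, v t)))).insert k
      (f ((PySem.Dict.mk (ts.map (fun t => (t, v t)))).getD k [])) = _
  apply PySem.Dict.ext
  rw [PySem.Dict.items_insert_of_contains _ _ hc, hg]
  have hit : (PySem.Dict.mk (ts.map (fun t => (t, v t)))).items = ts.map (fun t => (t, v t)) := rfl
  rw [hit, List.map_map]
  show _ = List.map (fun t => (t, if t = k then f (v t) else v t)) ts
  apply List.map_congr_left
  intro t _
  by_cases h : t = k <;> simp [h]

lemma tri_toList (result : String) (i : Nat) :
    (triA result i).toList = (result.toList.drop i).take 3 := by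
  have h3 : ((i : Int) + 3) = ((i : Int) + ((3 : Nat) : Int)) := by norm_num
  simp [triA, PySem.Str.toList_slice, h3, PySem.List.slice_natCast_add]

lemma triA_mem (result : String) (hbin : ∀ c ∈ result.toList.dropLast, c = '0' ∨ c = '1')
    (i : Nat) (hi : (i : Int) < PySem.Str.len result - 3) : triA result i ∈ triads8 := by
  have hcs : result.toList.length = result.length := by simp
  have hL : PySem.Str.len result = (result.length : Int) := by simp [PySem.Str.len_eq]
  have hiN : i + 3 < result.toList.length := by omega
  apply mem_triads8
  · rw [tri_toList]; simp; omega
  · intro c hc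
    rw [tri_toList] at hc
    obtain ⟨j, hj, hcj⟩ := List.mem_iff_getElem.mp hc
    have hj3 : j < 3 := by
      have := List.length_take_le 3 (result.toList.drop i); omega
    have hji : i + j < result.toList.length - 1 := by omega
    have hc2 : c = result.toList[i + j]'(by omega) := by
      rw [← hcj]; simp [List.getElem_take, List.getElem_drop]
    have hd : result.toList[i + j]'(by omega) = result.toList.dropLast[i + j]'(by
        simp [List.length_dropLast]; omega) := by
      rw [List.getElem_dropLast]
    rw [hc2, hd]
    exact hbin _ (List.getElem_mem _)

lemma c0_succ (result t : String) (n : Nat) :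
    c0 result (n + 1) t = c0 result n t
      + (if triA result n = t ∧ PySem.Str.pyGet? result ((n : Int) + 3) = some '0'
         then 1 else 0) := by
  by_cases h : triA result n = t ∧ PySem.Str.pyGet? result ((n : Int) + 3) = some '0' <;>
    simp [c0, bA0, List.range_succ, List.countP_append, h]

lemma c1_succ (result t : String) (n : Nat) :
    c1 result (n + 1) t = c1 result n t
      + (if triA result n = t ∧ ¬ PySem.Str.pyGet? result ((n : Int) + 3) = some '0'
         then 1 else 0) := by
  by_cases h : triA result n = t ∧ ¬ PySem.Str.pyGet? result ((n : Int) + 3) = some '0' <;>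
    simp [c1, bA1, List.range_succ, List.countP_append, h]

lemma triads8_nodup : triads8.Nodup := by decide

lemma A_inv (result : String) (hkeys : ∀ i : Nat, (i : Int) < PySem.Str.len result - 3 →
      triA result i ∈ triads8) (n : Nat) (hn : n ≤ (PySem.Str.len result - 3).toNat) :
    (PySem.List.pyRange 0 (n : Int) 1).foldl (A_step result) A_init
      = PySem.Dict.mk (triads8.map (fun t => (t, [c0 result n t, c1 result n t]))) := by
  induction n with
  | zero =>
    rw [show ((0 : Nat) : Int) = 0 from rfl, PySem.List.pyRange_one_eq_nil le_rfl]
    simp [A_init_eq, c0, c1]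
  | succ n ih =>
    have hn' : n ≤ (PySem.Str.len result - 3).toNat := by omega
    have hlt : (n : Int) < PySem.Str.len result - 3 := by omega
    have hsplit : PySem.List.pyRange 0 ((n + 1 : Nat) : Int) 1
        = PySem.List.pyRange 0 (n : Int) 1 ++ [(n : Int)] := by
      push_cast
      exact PySem.List.pyRange_one_succ_right (by positivity)
    rw [hsplit, List.foldl_append, ih hn']
    have hmem : triA result n ∈ triads8 := hkeys n hlt
    show A_step result _ _ = _
    rw [A_step]
    by_cases hbit : PySem.Str.pyGet? result ((n : Int) + 3) = some '0'
    · rw [if_pos hbit]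
      rw [show PySem.Str.slice result (some (n : Int)) (some ((n : Int) + 3)) = triA result n from rfl]
      rw [modify_mk_map triads8 triads8_nodup _ _ hmem]
      congr 1
      apply List.map_congr_left
      intro t _
      rw [c0_succ, c1_succ]
      by_cases ht : t = triA result n
      · subst ht
        rw [if_pos rfl, if_pos ⟨rfl, hbit⟩, if_neg (fun h => h.2 hbit)]
        simp [PySem.List.pySetD, PySem.List.pySet?, PySem.List.pyGetD,
          PySem.List.pyGet?, PySem.List.pyIdx?]
      · rw [if_neg ht, if_neg (fun h => ht h.1.symm), if_neg (fun h => ht h.1.symm)]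
        simp
    · rw [if_neg hbit]
      rw [show PySem.Str.slice result (some (n : Int)) (some ((n : Int) + 3)) = triA result n from rfl]
      rw [modify_mk_map triads8 triads8_nodup _ _ hmem]
      congr 1
      apply List.map_congr_left
      intro t _
      rw [c0_succ, c1_succ]
      by_cases ht : t = triA result n
      · subst ht
        rw [if_pos rfl, if_neg (fun h => hbit h.2), if_pos ⟨rfl, hbit⟩]
        simp [PySem.List.pySetD, PySem.List.pySet?, PySem.List.pyGetD,
          PySem.List.pyGet?, PySem.List.pyIdx?]
      · rw [if_neg ht, if_neg (fun h => ht h.1.symm), if_neg (fun h => ht h.1.symm)]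
        simp

lemma win_toList (result : String) (i : Nat) :
    (PySem.Str.slice result (some (i : Int)) (some ((i : Int) + 4))).toList
      = (result.toList.drop i).take 4 := by
  have h4 : ((i : Int) + 4) = ((i : Int) + ((4 : Nat) : Int)) := by norm_num
  simp [PySem.Str.toList_slice, h4, PySem.List.slice_natCast_add]

lemma win_tri (result : String) (i : Nat) :
    PySem.Str.slice (PySem.Str.slice result (some (i : Int)) (some ((i : Int) + 4)))
      (some 0) (some 3) = triA result i := by
  apply String.toList_inj.mp
  rw [PySem.Str.toList_slice, PySem.Chars.slice_eq_listSlice, win_toList,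
    PySem.List.slice_zero_start, tri_toList]
  norm_num [PySem.List.slice_to, List.take_take]
  simp

lemma win_bit (result : String) (i : Nat) :
    PySem.Str.pyGet? (PySem.Str.slice result (some (i : Int)) (some ((i : Int) + 4))) 3
      = PySem.Str.pyGet? result ((i : Int) + 3) := by
  have h3 : ((i : Int) + 3) = (((i + 3 : Nat) : Int)) := by push_cast; ring
  have h3' : (3 : Int) = ((3 : Nat) : Int) := by norm_num
  rw [h3, PySem.Str.pyGet?_natCast, h3', PySem.Str.pyGet?_natCast, win_toList]
  simp [List.getElem?_drop]

lemma B_eq (result : String) :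
    get_triada_dict_alt result
      = triads8.map (fun t =>
          (t, [c0 result (PySem.Str.len result - 3).toNat t,
               c1 result (PySem.Str.len result - 3).toNat t])) := by
  simp only [get_triada_dict_alt, triadsB_eq, pyRange_toNat (PySem.Str.len result - 3),
    PySem.List.pyRange_zero_nat, List.map_map]
  apply List.map_congr_left
  intro t _
  rw [PySem.List.foldl_ite_add_one, PySem.List.foldl_ite_add_one]
  simp only [List.countP_map, zero_add]
  refine congrArg (fun l => (t, l)) ?_
  simp only [List.cons.injEq, and_true]
  refine ⟨?_, ?_⟩
  · unfold c0
    refine congrArg (fun n : Nat => (n : Int)) (List.countP_congr ?_)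
    intro k hk
    simp only [Function.comp_apply, bA0, decide_eq_true_eq, win_tri, win_bit]
  · unfold c1
    refine congrArg (fun n : Nat => (n : Int)) (List.countP_congr ?_)
    intro k hk
    simp only [Function.comp_apply, bA1, decide_eq_true_eq, win_tri, win_bit]

-- ===== VERDICT (by name: the statement is the Claim_ definition above) =====
theorem get_triada_dict_spec : Claim_equal_get_triada_dict := by
  intro result _ hpre
  unfold Spec_get_triada_dict
  have hkeys : ∀ i : Nat, (i : Int) < PySem.Str.len result - 3 → triA result i ∈ triads8 := by
    intro i hi
    rcases hpre with hlen | hbin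
    · exfalso
      have h0 : (0 : Int) ≤ (i : Int) := by positivity
      omega
    · refine triA_mem result ?_ i hi
      intro c hc
      have := List.all_eq_true.mp hbin c hc
      simpa using this
  rw [get_triada_dict, pyRange_toNat (PySem.Str.len result - 3),
    A_inv result hkeys _ le_rfl, B_eq]
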